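-- pv_equiv track=rewrite | github.com/Eduar-DEV/Compare_murex_interface | limpia_sufijo.py | strip_after_ext
-- ===== SOURCE A (Python) =====
-- from typing import Optional
--
-- TARGET_EXTS = (".csv", ".txt", ".xls", ".pdf")
--
-- def strip_after_ext(filename: str) -> Optional[str]:
--     """
--     Si el nombre contiene alguna de las extensiones objetivo (.csv, .txt, .xls, .pdf)
--     (en cualquier casing) y tiene texto después, retorna el nombre recortado hasta
--     la extensión. Esto incluye casos con '_PRO' (ej.: .csv_PRO* -> .csv).
--     Si no hay cambios que hacer, retorna None.
--     """
--     low = filename.lower()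
--
--     # Hallar la primera ocurrencia de cualquiera de las extensiones
--     first_hit_idx = None
--     hit_ext = None
--     for ext in TARGET_EXTS:
--         idx = low.find(ext)
--         if idx != -1:
--             if first_hit_idx is None or idx < first_hit_idx:
--                 first_hit_idx = idx
--                 hit_ext = ext
--
--     if first_hit_idx is None or hit_ext is None:
--         return None
--
--     cut_at = first_hit_idx + len(hit_ext)  # posición justo después de la extensión
--
--     # Si el nombre ya termina exactamente en la extensión, no hay cambios
--     if cut_at == len(filename):
--         return None
--
--     # En cualquier otro caso, recortamos hasta la extensión (elimina "_PRO" y cualquier sufijo)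
--     new_name = filename[:cut_at]
--
--     # Normalizamos el casing de la extensión a minúsculas (opcional, pero consistente)
--     # Conserva el nombre base tal cual, solo fuerza la extensión a minúsculas.
--     base = filename[:first_hit_idx]
--     new_name = base + hit_ext  # hit_ext ya está en minúsculas
--
--     return new_name
-- ===== SOURCE B (Python) =====
-- from typing import Optional
--
-- TARGET_EXTS = (".csv", ".txt", ".xls", ".pdf")
--
-- def strip_after_ext(filename: str) -> Optional[str]:
--     low = filename.lower()
--     for i in range(len(low)):
--         seg = low[i:i + 4]
--         if seg in TARGET_EXTS:
--             if i + 4 == len(filename):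
--                 return None
--             return filename[:i] + seg
--     return None
-- ===== Notes on version B (the rewrite author's own statement) =====
-- stated objective: alternative
-- what changed: Instead of running str.find for each of the four extensions and taking the minimum hit index, B makes a single left-to-right scan over positions and stops at the first position whose 4-char lowercase slice is a target extension.
import Mathlib
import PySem

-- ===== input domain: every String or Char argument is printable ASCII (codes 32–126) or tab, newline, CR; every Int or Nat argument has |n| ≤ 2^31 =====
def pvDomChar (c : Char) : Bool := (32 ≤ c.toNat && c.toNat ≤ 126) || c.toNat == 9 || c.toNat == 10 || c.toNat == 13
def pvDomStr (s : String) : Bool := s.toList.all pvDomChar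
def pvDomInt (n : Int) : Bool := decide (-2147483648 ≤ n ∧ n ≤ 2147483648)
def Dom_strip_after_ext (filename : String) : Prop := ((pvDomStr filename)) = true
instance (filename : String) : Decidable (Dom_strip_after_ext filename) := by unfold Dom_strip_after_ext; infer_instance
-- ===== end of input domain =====

-- B replaces A's four str.find passes (minimum hit index) by one left-to-right scan that stops
-- at the first position whose 4-char lowercase slice is a target extension (objective: alternative).

-- ===== PORT A =====
def TARGET_EXTS : List (List Char) :=
  [['.', 'c', 's', 'v'], ['.', 't', 'x', 't'], ['.', 'x', 'l', 's'], ['.', 'p', 'd', 'f']]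

-- one iteration of A's 'for ext in TARGET_EXTS' loop over (first_hit_idx, hit_ext)
def stepA (low : List Char) (acc : Option Int × Option (List Char)) (ext : List Char) :
    Option Int × Option (List Char) :=
  let idx := PySem.Chars.find low ext
  if idx ≠ -1 then
    match acc.1 with
    | none => (some idx, some ext)
    | some f => if idx < f then (some idx, some ext) else acc
  else acc

def strip_after_ext (filename : String) : Option String :=
  let fn := filename.toList
  let low := PySem.Chars.lower fn
  match TARGET_EXTS.foldl (stepA low) (none, none) with
  | (some f, some e) =>
      let cutAt : Int := f + (e.length : Int)
      if cutAt = (fn.length : Int) then none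
      else some (String.ofList (fn.take f.toNat ++ e))  -- filename[:first_hit_idx] + hit_ext; f ≥ 0 here
  | _ => none

-- ===== PORT B =====
-- B's 'for i in range(len(low))' over slices low[i:i+4], as the structural recursion on the suffix
def scanB : List Char → Option (Nat × List Char)
  | [] => none
  | c :: rest =>
      let seg := (c :: rest).take 4   -- low[i:i+4]
      if seg ∈ TARGET_EXTS then some (0, seg)
      else (scanB rest).map (fun p => (p.1 + 1, p.2))

def strip_after_ext_alt (filename : String) : Option String :=
  let fn := filename.toList
  match scanB (PySem.Chars.lower fn) with
  | some (i, seg) =>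
      if i + 4 = fn.length then none
      else some (String.ofList (fn.take i ++ seg))  -- filename[:i] + seg
  | none => none

-- ===== PRECONDITION & SPEC =====
def Spec_strip_after_ext (filename : String) (out : Option String) : Prop := out = strip_after_ext_alt filename
instance (filename : String) (out : Option String) : Decidable (Spec_strip_after_ext filename out) := by unfold Spec_strip_after_ext; infer_instance

-- ===== CLAIM (what is proved, stated in full; the proofs are below) =====
def Claim_equal_strip_after_ext : Prop := ∀ (filename : String), Dom_strip_after_ext filename → Spec_strip_after_ext filename (strip_after_ext filename)

-- ===== LEMMAS AND PROOFS =====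

theorem ext_len {e : List Char} (h : e ∈ TARGET_EXTS) : e.length = 4 := by
  simp [TARGET_EXTS] at h
  rcases h with h | h | h | h <;> subst h <;> rfl

theorem ext_uniq {e₁ e₂ t : List Char} (h₁ : e₁ ∈ TARGET_EXTS) (h₂ : e₂ ∈ TARGET_EXTS)
    (p₁ : e₁ <+: t) (p₂ : e₂ <+: t) : e₁ = e₂ := by
  rw [List.prefix_iff_eq_take] at p₁ p₂
  rw [p₁, p₂, ext_len h₁, ext_len h₂]

-- a length-4 extension is a prefix of l iff it is l.take 4
theorem mem_take_iff {l : List Char} :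
    l.take 4 ∈ TARGET_EXTS ↔ ∃ e ∈ TARGET_EXTS, e <+: l := by
  constructor
  · intro h
    exact ⟨l.take 4, h, List.take_prefix 4 l⟩
  · rintro ⟨e, he, hp⟩
    rw [List.prefix_iff_eq_take] at hp
    rw [ext_len he] at hp
    rwa [← hp]

theorem scanB_none {l : List Char} (h : scanB l = none) :
    ∀ j, ∀ e ∈ TARGET_EXTS, ¬ e <+: l.drop j := by
  induction l with
  | nil =>
    intro j e he hp
    simp at hp
    subst hp
    simp [TARGET_EXTS] at he
  | cons c rest ih =>
    intro j e he hp
    rw [scanB] at h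
    by_cases hm : (c :: rest).take 4 ∈ TARGET_EXTS
    · rw [if_pos hm] at h
      simp at h
    · rw [if_neg hm] at h
      rw [Option.map_eq_none_iff] at h
      cases j with
      | zero => exact hm (mem_take_iff.mpr ⟨e, he, by simpa using hp⟩)
      | succ j => exact ih h j e he (by simpa using hp)

theorem scanB_some {l : List Char} {i : Nat} {e : List Char} (h : scanB l = some (i, e)) :
    e ∈ TARGET_EXTS ∧ e <+: l.drop i ∧ ∀ j < i, ∀ e' ∈ TARGET_EXTS, ¬ e' <+: l.drop j := by
  induction l generalizing i e with
  | nil => simp [scanB] at h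
  | cons c rest ih =>
    rw [scanB] at h
    by_cases hm : (c :: rest).take 4 ∈ TARGET_EXTS
    · rw [if_pos hm] at h
      simp only [Option.some.injEq, Prod.mk.injEq] at h
      obtain ⟨hi, he⟩ := h
      subst hi; subst he
      refine ⟨hm, ?_, by omega⟩
      simpa using List.take_prefix 4 (c :: rest)
    · rw [if_neg hm] at h
      cases hs : scanB rest with
      | none => simp [hs] at h
      | some p =>
        obtain ⟨i', e'⟩ := p
        simp [hs] at h
        obtain ⟨hi, he⟩ := h
        subst he
        obtain ⟨m1, m2, m3⟩ := ih hs
        refine ⟨m1, by rw [← hi]; simpa using m2, ?_⟩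
        intro j hj e'' he'' hp
        cases j with
        | zero => exact hm (mem_take_iff.mpr ⟨e'', he'', by simpa using hp⟩)
        | succ j => exact m3 j (by omega) e'' he'' (by simpa using hp)

-- A's fold invariant over the processed prefix S of TARGET_EXTS
def InvA (low : List Char) (S : List (List Char)) : Option Int × Option (List Char) → Prop
  | (none, none) => ∀ e ∈ S, PySem.Chars.find low e = -1
  | (some f, some e) => e ∈ S ∧ PySem.Chars.find low e = f ∧ f ≠ -1 ∧
      ∀ e' ∈ S, PySem.Chars.find low e' = -1 ∨ f ≤ PySem.Chars.find low e'
  | _ => False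

theorem stepA_inv {low : List Char} {S : List (List Char)} {acc : Option Int × Option (List Char)}
    (hacc : InvA low S acc) (ext : List Char) : InvA low (S ++ [ext]) (stepA low acc ext) := by
  obtain ⟨f?, e?⟩ := acc
  unfold stepA
  by_cases hidx : PySem.Chars.find low ext = -1
  · simp only [hidx, ne_eq, not_true_eq_false, reduceIte]
    match f?, e? with
    | none, none =>
      intro e he
      rcases List.mem_append.mp he with h | h
      · exact hacc e h
      · simp at h; subst h; exact hidx
    | some f, some e =>
      obtain ⟨h1, h2, h3, h4⟩ := hacc
      refine ⟨List.mem_append_left _ h1, h2, h3, ?_⟩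
      intro e' he'
      rcases List.mem_append.mp he' with h | h
      · exact h4 e' h
      · simp at h; subst h; exact Or.inl hidx
    | none, some e => exact hacc.elim
    | some f, none => exact hacc.elim
  · simp only [hidx, ne_eq, not_false_eq_true, if_pos]
    match f?, e? with
    | none, none =>
      refine ⟨List.mem_append_right _ (by simp), rfl, hidx, ?_⟩
      intro e' he'
      rcases List.mem_append.mp he' with h | h
      · exact Or.inl (hacc e' h)
      · simp at h; subst h; exact Or.inr le_rfl
    | some f, some e =>
      obtain ⟨h1, h2, h3, h4⟩ := hacc
      by_cases hlt : PySem.Chars.find low ext < f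
      · simp only [hlt, if_pos]
        refine ⟨List.mem_append_right _ (by simp), rfl, hidx, ?_⟩
        intro e' he'
        rcases List.mem_append.mp he' with h | h
        · rcases h4 e' h with h' | h'
          · exact Or.inl h'
          · exact Or.inr (le_trans (le_of_lt hlt) h')
        · simp at h; subst h; exact Or.inr le_rfl
      · simp only [hlt, reduceIte]
        refine ⟨List.mem_append_left _ h1, h2, h3, ?_⟩
        intro e' he'
        rcases List.mem_append.mp he' with h | h
        · exact h4 e' h
        · simp at h; subst h; exact Or.inr (by omega)
    | none, some e => exact hacc.elim
    | some f, none => exact hacc.elim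

theorem foldA_inv {low : List Char} (exts : List (List Char)) {S : List (List Char)}
    {acc : Option Int × Option (List Char)} (hacc : InvA low S acc) :
    InvA low (S ++ exts) (exts.foldl (stepA low) acc) := by
  induction exts generalizing S acc with
  | nil => simpa using hacc
  | cons x xs ih =>
    have := ih (stepA_inv hacc x)
    simpa using this

-- no occurrence anywhere ↔ find = -1
theorem find_neg_of_no_prefix {low e : List Char} (h : ∀ j, ¬ e <+: low.drop j) :
    PySem.Chars.find low e = -1 := by
  rw [PySem.Chars.find_eq_neg_one_iff]
  intro hinf
  have : PySem.Chars.isIn e low = true := (PySem.Chars.isIn_iff_infix e low).mpr hinf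
  obtain ⟨j, hj⟩ := (PySem.Chars.exists_prefix_drop_iff_isIn e low).mpr this
  exact h j hj

-- the two searches agree
theorem search_agree (low : List Char) :
    ∀ res, TARGET_EXTS.foldl (stepA low) (none, none) = res →
    (scanB low = none → res = (none, none)) ∧
    (∀ i e, scanB low = some (i, e) → res = (some (i : Int), some e)) := by
  intro res hres
  have hinv : InvA low TARGET_EXTS res := by
    have := foldA_inv (low := low) TARGET_EXTS (S := [])
      (acc := (none, none)) (by intro e he; simp at he)
    rw [hres] at this
    simpa using this
  constructor
  · intro hn
    have hall := scanB_none hn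
    match res, hinv with
    | (none, none), _ => rfl
    | (some f, some e), ⟨h1, h2, h3, _⟩ =>
      exact absurd (h2 ▸ find_neg_of_no_prefix (fun j => hall j e h1)) h3
  · intro i e hs
    obtain ⟨he, hpre, hmin⟩ := scanB_some hs
    -- e occurs, so find low e ≥ 0 and its first occurrence is ≤ i
    have hfe : PySem.Chars.find low e ≠ -1 := by
      rw [PySem.Chars.find_ne_neg_one_iff]
      exact (PySem.Chars.isIn_iff_infix e low).mp
        ((PySem.Chars.exists_prefix_drop_iff_isIn e low).mp ⟨i, hpre⟩)
    match res, hinv with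
    | (none, none), hin => exact absurd (hin e he) hfe
    | (some f, some e'), ⟨h1, h2, h3, h4⟩ =>
      have hf0 : 0 ≤ f := by
        have := PySem.Chars.neg_one_le_find low e'
        omega
      have h2' : 0 ≤ PySem.Chars.find low e' := h2 ▸ hf0
      obtain ⟨hp', hmin'⟩ := PySem.Chars.find_spec h2'
      rw [h2] at hp' hmin'
      have h4e : f ≤ PySem.Chars.find low e := (h4 e he).resolve_left hfe
      have hfe0 : 0 ≤ PySem.Chars.find low e := le_trans hf0 h4e
      obtain ⟨hpe, hmine⟩ := PySem.Chars.find_spec hfe0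
      have hA : (PySem.Chars.find low e).toNat ≤ i := by
        by_contra hc
        exact hmine i (Nat.lt_of_not_le hc) hpre
      have hfi : f.toNat = i := by
        by_contra hc
        have hlt : f.toNat < i := by omega
        exact hmin f.toNat hlt e' h1 hp'
      have hee : e' = e := ext_uniq h1 he (hfi ▸ hp') hpre
      have hfint : f = (i : Int) := by omega
      rw [hee, hfint]

-- ===== VERDICT (by name: the statement is the Claim_ definition above) =====
theorem strip_after_ext_spec : Claim_equal_strip_after_ext := by
  intro filename _
  unfold Spec_strip_after_ext
  show strip_after_ext filename = strip_after_ext_alt filename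
  rw [strip_after_ext, strip_after_ext_alt]
  obtain ⟨hn, hsome⟩ := search_agree (PySem.Chars.lower filename.toList) _ rfl
  cases hscan : scanB (PySem.Chars.lower filename.toList) with
  | none =>
    rw [hn hscan]
  | some p =>
    obtain ⟨i, e⟩ := p
    rw [hsome i e hscan]
    have hlen : e.length = 4 := ext_len (scanB_some hscan).1
    show (if ((i : Int) + (e.length : Int) = (filename.toList.length : Int)) then none
          else some (String.ofList (filename.toList.take ((i : Int)).toNat ++ e)))
        = (if i + 4 = filename.toList.length then none
          else some (String.ofList (filename.toList.take i ++ e)))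
    rw [hlen, Int.toNat_natCast]
    by_cases hc : i + 4 = filename.toList.length
    · rw [if_pos (by push_cast; omega), if_pos hc]
    · rw [if_neg (by push_cast; omega), if_neg hc]
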